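-- pv_equiv track=rewrite | github.com/kyeser/scTools | scTools.py | primeForm
-- ===== SOURCE A (Python) =====
-- def fsv(pcset):
--     """Finds smallest values of pcset and returns their index numbers."""
--     l = []
--     for x in range(len(pcset)):
--         if len(l) == 0 or pcset[x] < pcset[l[0]]:
--             l = [x]
--         elif pcset[x] == pcset[l[0]]:
--             l.append(x)
--     return l
--
-- def primeForm(p):
--     """Returns prime form of pcset."""
--     # Remove duplicates.
--     # p = unique(p)
--     # number of elements in p
--     n = len(p)
--     # Test if p is null set.
--     if n == 0:
--         return p
--     else:
--         # Produce inversion of p, ip.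
--         ip = [(12-x)%12 for x in p]
--         # Arrange p and ip in ascending order.
--         p.sort(), ip.sort()
--         q = 1
--         # Produce the set s comprised of all rotations of p and ip.
--         s = []
--         for y in range(n):
--             rotation_p = p[y:]+p[0:y]; s.append(rotation_p)
--             rotation_ip = ip[y:]+ip[0:y]; s.append(rotation_ip)
--         # Find the subset subset_s of all pccycs s[z] in s where
--         # i<s[z][0],s[z][n-q]> is minimal.
--         while 1:
--             r = [(z[n-q]-z[0])%12 for z in s]
--             t = fsv(r)
--             subset_s = [s[xx] for xx in t]
--             # Delete all members of s not in subset_s.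
--             s = subset_s
--             # If s has only one member, transpose the sole member of s
--             # so it begins on 0; if q = n, take any member of s and
--             # transpose it so it begins on 0.
--             # The resulting pccyc is prime form.
--             if len(s) == 1 or q == n:
--                 s = s[0]
--                 prime_form = [(yy-s[0])%12 for yy in s]
--                 return prime_form
--                 break
--             # Otherwise, increment the value of q by 1 and continue.
--             else:
--                 q += 1
--                 continue
-- ===== SOURCE B (Python) =====
-- def primeForm(p):
--     """Returns prime form of pcset."""
--     n = len(p)
--     if n == 0:
--         return p
--     ip = sorted((12 - x) % 12 for x in p)
--     p.sort()
--     candidates = []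
--     for base in (p, ip):
--         for y in range(n):
--             rot = base[y:] + base[:y]
--             candidates.append([(v - rot[0]) % 12 for v in rot])
--     # prime form minimizes the interval vector read from the top index down:
--     # compare candidates by their reversed tuple and take the minimum.
--     return min(candidates, key=lambda c: tuple(reversed(c)))
-- ===== Notes on version B (the rewrite author's own statement) =====
-- stated objective: simpler
-- what changed: Replaces A's fsv helper and the iterative while/q elimination rounds over interval comparisons by building the 2n zero-based candidate rotations once and taking min() with a reversed-tuple key in a single pass.
import Mathlib
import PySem

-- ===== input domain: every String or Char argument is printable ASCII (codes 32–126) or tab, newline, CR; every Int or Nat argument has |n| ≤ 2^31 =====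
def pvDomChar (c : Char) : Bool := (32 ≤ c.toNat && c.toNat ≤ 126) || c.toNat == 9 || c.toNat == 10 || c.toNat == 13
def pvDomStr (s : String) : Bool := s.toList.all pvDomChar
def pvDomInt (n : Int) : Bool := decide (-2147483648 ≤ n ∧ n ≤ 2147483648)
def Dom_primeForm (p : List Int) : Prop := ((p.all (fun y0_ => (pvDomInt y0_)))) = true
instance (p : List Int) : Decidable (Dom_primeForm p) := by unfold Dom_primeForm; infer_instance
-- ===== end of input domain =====

-- B replaces A's fsv helper and iterative while/q narrowing loop by a single min() over the
-- 2n zero-based candidates with a reversed-tuple key (objective: simpler).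
-- Both A and B sort the argument p in place; the theorems below are about the return value.

-- ===== PORT A =====

-- l[0]/pcset[x] accesses: every index used is in range (x ranges over range(len), l holds
-- previous such indices), so getD with a default is exact here.
def fsv (pcset : List Int) : List Nat :=
  (List.range pcset.length).foldl (fun l x =>
    if l.length = 0 ∨ pcset.getD x 0 < pcset.getD (l.getD 0 0) 0 then [x]
    else if pcset.getD x 0 = pcset.getD (l.getD 0 0) 0 then l ++ [x]
    else l) []

-- A's `while 1` loop; q starts at 1 and the loop returns by the time q = n, so fuel = n
-- suffices and the fuel-0 branch is unreachable (a fuel guard making the recursion total).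
def pfLoop (n : Nat) : Nat → Nat → List (List Int) → List Int
  | 0, _, _ => []
  | fuel+1, q, s =>
    let r := s.map (fun z => PySem.Int.mod (z.getD (n - q) 0 - z.getD 0 0) 12)
    let t := fsv r
    let s' := t.map (fun xx => s.getD xx ([] : List Int))
    if s'.length = 1 ∨ q = n then
      let z := s'.getD 0 []
      z.map (fun yy => PySem.Int.mod (yy - z.getD 0 0) 12)
    else pfLoop n fuel (q + 1) s'

-- slices p[y:] / p[0:y] with 0 ≤ y < n are exactly drop/take.
def primeForm (p : List Int) : List Int :=
  let n := p.length
  if n = 0 then p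
  else
    let ip := p.map (fun x => PySem.Int.mod (12 - x) 12)
    let ps := PySem.List.sorted p (fun x => x) false
    let ips := PySem.List.sorted ip (fun x => x) false
    let s := (List.range n).foldl
      (fun acc y => (acc ++ [ps.drop y ++ ps.take y]) ++ [ips.drop y ++ ips.take y]) []
    pfLoop n n 1 s

-- ===== PORT B =====

-- tuple(reversed(c)) as min key = List.reverse with the lexicographic order on List Int
-- (Python's tuple comparison); candidates is nonempty (n ≥ 1) so min never raises.
def primeForm_alt (p : List Int) : List Int :=
  let n := p.length
  if n = 0 then p
  else
    let ip := PySem.List.sorted (p.map (fun x => PySem.Int.mod (12 - x) 12)) (fun x => x) false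
    let ps := PySem.List.sorted p (fun x => x) false
    let candidates := [ps, ip].flatMap (fun base =>
      (List.range n).map (fun y =>
        let rot := base.drop y ++ base.take y
        rot.map (fun v => PySem.Int.mod (v - rot.getD 0 0) 12)))
    (PySem.List.min? candidates (fun c => c.reverse)).getD []

-- ===== PRECONDITION & SPEC =====
def Spec_primeForm (p : List Int) (out : List Int) : Prop := out = primeForm_alt p
instance (p : List Int) (out : List Int) : Decidable (Spec_primeForm p out) := by unfold Spec_primeForm; infer_instance

-- ===== CLAIM (what is proved, stated in full; the proofs are below) =====
def Claim_equal_primeForm : Prop := ∀ (p : List Int), Dom_primeForm p → Spec_primeForm p (primeForm p)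

-- ===== LEMMAS AND PROOFS =====

-- transposition of a rotation so it begins on 0
def tpz (z : List Int) : List Int := z.map (fun v => PySem.Int.mod (v - z.getD 0 0) 12)

-- the value A compares at position k
def fco (k : Nat) (z : List Int) : Int := PySem.Int.mod (z.getD k 0 - z.getD 0 0) 12

-- min of a nonempty Int list, as the running fold
def minv : List Int → Int
  | [] => 0
  | a :: t => t.foldl min a

-- keep the members of s whose k-th compared value is minimal (one loop step of A)
def filt (k : Nat) (s : List (List Int)) : List (List Int) :=
  s.filter (fun z => decide (fco k z = minv (s.map (fco k))))

-- A's whole loop: filter at positions k, k-1, …, 0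
def sieve : Nat → List (List Int) → List (List Int)
  | 0, s => filt 0 s
  | k+1, s => sieve k (filt (k+1) s)

-- the comparison key [fco k z, fco (k-1) z, …, fco 0 z]
def seg : Nat → List Int → List Int
  | 0, z => [fco 0 z]
  | k+1, z => fco (k+1) z :: seg k z

lemma getD_lt' {α : Type} (r : List α) (d : α) (m : Nat) (h : m < r.length) : r.getD m d = r[m] := by
  simp [List.getD_eq_getElem?_getD, List.getElem?_eq_getElem h]

lemma foldl_min_le_init : ∀ (t : List Int) (b : Int), t.foldl min b ≤ b := by
  intro t
  induction t with
  | nil => intro b; simp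
  | cons c t ih =>
    intro b
    calc (c :: t).foldl min b = t.foldl min (min b c) := by simp [List.foldl]
    _ ≤ min b c := ih _
    _ ≤ b := min_le_left _ _

lemma foldl_min_le_mem : ∀ (t : List Int) (b : Int), ∀ x ∈ t, t.foldl min b ≤ x := by
  intro t
  induction t with
  | nil => intro b x hx; simp at hx
  | cons c t ih =>
    intro b x hx
    rcases List.mem_cons.mp hx with h | hx
    · subst h
      calc (x :: t).foldl min b = t.foldl min (min b x) := by simp [List.foldl]
      _ ≤ min b x := foldl_min_le_init _ _
      _ ≤ x := min_le_right _ _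
    · exact ih (min b c) x hx

lemma minv_le (xs : List Int) : ∀ a ∈ xs, minv xs ≤ a := by
  cases xs with
  | nil => intro a ha; simp at ha
  | cons b t =>
    intro a ha
    rcases List.mem_cons.mp ha with h | ha
    · subst h; exact foldl_min_le_init t a
    · exact foldl_min_le_mem t b a ha

lemma foldl_min_mem : ∀ (t : List Int) (b : Int), t.foldl min b = b ∨ t.foldl min b ∈ t := by
  intro t
  induction t with
  | nil => intro b; left; rfl
  | cons c t ih =>
    intro b
    rcases ih (min b c) with h | h
    · rcases min_cases b c with ⟨he, _⟩ | ⟨he, _⟩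
      · left; simpa [List.foldl, he] using h
      · right; simp only [List.foldl] at *; rw [h, he]; exact List.mem_cons_self
    · right; exact List.mem_cons_of_mem _ (by simpa [List.foldl] using h)

lemma minv_mem (xs : List Int) (h : xs ≠ []) : minv xs ∈ xs := by
  cases xs with
  | nil => simp at h
  | cons b t =>
    rcases foldl_min_mem t b with h1 | h1
    · simp [minv, h1]
    · exact List.mem_cons_of_mem _ (by simpa [minv] using h1)

lemma minv_append (xs : List Int) (a : Int) :
    minv (xs ++ [a]) = if xs = [] then a else min (minv xs) a := by
  cases xs with
  | nil => simp [minv]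
  | cons b t => simp [minv, List.foldl_append]

lemma mrel (s : List (List Int)) (f : List Int → Int) (z : List Int) (hz : z ∈ s) :
    (f z = minv (s.map f)) ↔ ∀ y ∈ s, f z ≤ f y := by
  constructor
  · intro h y hy
    rw [h]; exact minv_le _ _ (List.mem_map_of_mem hy)
  · intro h
    have hne : s.map f ≠ [] := by
      simp only [ne_eq, List.map_eq_nil_iff]
      rintro rfl; simp at hz
    obtain ⟨y0, hy0, he⟩ := List.mem_map.mp (minv_mem _ hne)
    exact le_antisymm (he ▸ h y0 hy0) (minv_le _ _ (List.mem_map_of_mem hz))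

lemma lex_cons_lt (a b : Int) (u v : List Int) :
    (a :: u < b :: v) ↔ a < b ∨ (a = b ∧ u < v) := by
  constructor
  · intro h
    cases h with
    | cons h => exact Or.inr ⟨rfl, h⟩
    | rel h => exact Or.inl h
  · rintro (h | ⟨rfl, h⟩)
    · exact List.Lex.rel h
    · exact List.Lex.cons h

lemma lex_cons_le (a b : Int) (u v : List Int) :
    (a :: u ≤ b :: v) ↔ a < b ∨ (a = b ∧ u ≤ v) := by
  rw [← not_lt, lex_cons_lt]
  constructor
  · intro h
    rcases lt_trichotomy a b with h1 | h1 | h1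
    · exact Or.inl h1
    · refine Or.inr ⟨h1, not_lt.mp ?_⟩
      intro hv; exact h (Or.inr ⟨h1.symm, hv⟩)
    · exact absurd (Or.inl h1) h
  · rintro (h | ⟨rfl, h⟩) hc
    · rcases hc with h2 | ⟨h2, _⟩ <;> omega
    · rcases hc with h2 | ⟨-, h2⟩
      · omega
      · exact absurd h (not_le.mpr h2)

lemma lex_single_le (a b : Int) : ([a] ≤ [b]) ↔ a ≤ b := by
  rw [lex_cons_le]
  constructor
  · rintro (h | ⟨h, -⟩) <;> omega
  · intro h
    rcases eq_or_lt_of_le h with h1 | h1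
    · exact Or.inr ⟨h1, le_refl _⟩
    · exact Or.inl h1

lemma getD_zero_mem {α : Type} (l : List α) (d : α) (h : l ≠ []) : l.getD 0 d ∈ l := by
  cases l with
  | nil => simp at h
  | cons a t => simp

lemma foldl2app (m : Nat) (f h : Nat → List Int) :
    (List.range m).foldl (fun acc y => (acc ++ [f y]) ++ [h y]) []
      = (List.range m).flatMap (fun y => [f y, h y]) := by
  induction m with
  | zero => simp
  | succ m ih =>
    rw [List.range_succ, List.foldl_append, ih, List.flatMap_append]
    simp [List.flatMap]

lemma rangemap {α : Type} (s : List α) (P : α → Bool) (d : α) :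
    ((List.range s.length).filter (fun i => P (s.getD i d))).map (fun i => s.getD i d)
      = s.filter P := by
  induction s with
  | nil => simp
  | cons z t ih =>
    rw [List.length_cons, List.range_succ_eq_map]
    rw [List.filter_cons]
    simp only [List.getD_cons_zero]
    rw [List.filter_map, List.filter_cons]
    by_cases hz : P z
    · simp only [hz, if_pos]
      rw [List.map_cons, List.map_map]
      simp only [List.getD_cons_zero, Function.comp_def, List.getD_cons_succ]
      rw [ih]
    · simp only [hz, if_neg, Bool.false_eq_true, not_false_iff]
      rw [List.map_map]
      simp only [Function.comp_def, List.getD_cons_succ]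
      rw [ih]

lemma getD_lt {r : List Int} {m : Nat} (h : m < r.length) : r.getD m 0 = r[m] := by
  simp [List.getD_eq_getElem?_getD, List.getElem?_eq_getElem h]

lemma take_succ_getD {r : List Int} {m : Nat} (h : m < r.length) :
    r.take (m + 1) = r.take m ++ [r.getD m 0] := by
  rw [List.take_succ, List.getElem?_eq_getElem h, getD_lt h]
  rfl

lemma getD_mem_take {r : List Int} {i m : Nat} (hi : i < m) (hm : m ≤ r.length) :
    r.getD i 0 ∈ r.take m := by
  have hil : i < r.length := lt_of_lt_of_le hi hm
  have h1 : i < (r.take m).length := by simp [List.length_take]; omega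
  have : (r.take m)[i] = r[i] := List.getElem_take
  rw [getD_lt hil, ← this]
  exact List.getElem_mem h1

lemma fsv_pref (r : List Int) : ∀ m, m ≤ r.length →
    (List.range m).foldl (fun l x =>
      if l.length = 0 ∨ r.getD x 0 < r.getD (l.getD 0 0) 0 then [x]
      else if r.getD x 0 = r.getD (l.getD 0 0) 0 then l ++ [x]
      else l) []
    = (List.range m).filter (fun i => decide (r.getD i 0 = minv (r.take m))) := by
  intro m
  induction m with
  | zero => intro _; simp
  | succ m ih =>
    intro hm
    have hmlt : m < r.length := hm
    have hmle : m ≤ r.length := le_of_lt hmlt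
    rw [List.range_succ, List.foldl_append, List.filter_append, ih hmle]
    rw [take_succ_getD hmlt]
    rw [minv_append]
    by_cases hm0 : m = 0
    · subst hm0
      simp [minv]
    · have hne : r.take m ≠ [] := by
        intro he
        have htm := congrArg List.length he
        rw [List.length_take, min_eq_left hmle] at htm
        simp at htm
        omega
      rw [if_neg hne]
      set a := r.getD m 0 with ha
      set mv := minv (r.take m) with hmv
      set l0 := (List.range m).filter (fun i => decide (r.getD i 0 = mv)) with hl0
      have hl0ne : l0 ≠ [] := by
        obtain ⟨i, hi, he⟩ := List.mem_iff_getElem.mp (minv_mem _ hne)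
        have hilen : i < m := by
          have := hi; simp [List.length_take] at this; omega
        have hpred : r.getD i 0 = mv := by
          rw [getD_lt (lt_of_lt_of_le hilen hmle)]
          rw [List.getElem_take] at he
          exact he
        apply List.ne_nil_of_mem (a := i)
        rw [hl0]
        exact List.mem_filter.mpr ⟨List.mem_range.mpr hilen, by simpa [List.getD_eq_getElem?_getD] using hpred⟩
      obtain ⟨hd, tl, hht⟩ := List.exists_cons_of_ne_nil hl0ne
      have hhd : r.getD hd 0 = mv := by
        have : hd ∈ l0 := by rw [hht]; exact List.mem_cons_self
        rw [hl0] at this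
        simpa using (List.mem_filter.mp this).2
      have hget : l0.getD 0 0 = hd := by rw [hht]; rfl
      have hlen0 : ¬ (l0.length = 0) := by
        simp [hht]
      -- the one fold step
      simp only [List.foldl_cons, List.foldl_nil]
      rw [hget, hhd]
      rcases lt_trichotomy a mv with h | h | h
      · rw [if_pos (Or.inr h)]
        have hmin : min mv a = a := min_eq_right (le_of_lt h)
        rw [hmin]
        have hleft : (List.range m).filter (fun i => decide (r.getD i 0 = a)) = [] := by
          apply List.filter_eq_nil_iff.mpr
          intro i hi
          have : mv ≤ r.getD i 0 := minv_le _ _ (getD_mem_take (List.mem_range.mp hi) hmle)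
          simp only [decide_eq_true_eq]
          omega
        rw [hleft, List.nil_append, List.filter_cons, List.filter_nil]
        rw [if_pos (by simp only [decide_eq_true_eq]; exact ha.symm)]
      · rw [if_neg (by push_neg; exact ⟨hlen0, by omega⟩)]
        rw [if_pos h]
        have hmin : min mv a = mv := min_eq_left (le_of_eq h.symm)
        rw [hmin, List.filter_cons, List.filter_nil]
        rw [if_pos (by simp only [decide_eq_true_eq]; exact h)]
      · rw [if_neg (by push_neg; exact ⟨hlen0, by omega⟩)]
        rw [if_neg (by omega)]
        have hmin : min mv a = mv := min_eq_left (le_of_lt h)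
        rw [hmin, List.filter_cons, List.filter_nil]
        have hne2 : ¬ (a = mv) := by omega
        rw [if_neg (by simp only [decide_eq_true_eq]; exact hne2)]
        rw [List.append_nil]

lemma fsv_spec (r : List Int) :
    fsv r = (List.range r.length).filter (fun i => decide (r.getD i 0 = minv r)) := by
  have := fsv_pref r r.length (le_refl _)
  rw [List.take_length] at this
  exact this

lemma stepA (s : List (List Int)) (f : List Int → Int) :
    (fsv (s.map f)).map (fun i => s.getD i ([] : List Int))
      = s.filter (fun z => decide (f z = minv (s.map f))) := by
  rw [fsv_spec, List.length_map]
  have hc : ∀ i ∈ List.range s.length,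
      (decide ((s.map f).getD i 0 = minv (s.map f)))
        = (fun j => decide (f (s.getD j ([] : List Int)) = minv (s.map f))) i := by
    intro i hi
    have hil : i < s.length := List.mem_range.mp hi
    have h1 : (s.map f).getD i 0 = f (s.getD i []) := by
      rw [getD_lt' _ _ _ (by simpa using hil), getD_lt' _ _ _ hil, List.getElem_map]
    rw [h1]
  rw [List.filter_congr hc]
  exact rangemap s (fun z => decide (f z = minv (s.map f))) []

lemma filt_singleton (k : Nat) (c : List Int) : filt k [c] = [c] := by
  simp [filt, minv]

lemma sieve_singleton : ∀ (k : Nat) (c : List Int), sieve k [c] = [c] := by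
  intro k
  induction k with
  | zero => intro c; simp [sieve, filt_singleton]
  | succ k ih => intro c; simp [sieve, filt_singleton, ih]

lemma pfLoop_sieve (n : Nat) : ∀ (fuel q : Nat) (s : List (List Int)), q ≤ n → n - q < fuel →
    pfLoop n fuel q s = tpz ((sieve (n - q) s).getD 0 []) := by
  intro fuel
  induction fuel with
  | zero => intro q s _ h; omega
  | succ fuel ih =>
    intro q s hq hfuel
    have hstep : (fsv (s.map (fun z => PySem.Int.mod (z.getD (n - q) 0 - z.getD 0 0) 12))).map
        (fun xx => s.getD xx ([] : List Int)) = filt (n - q) s := by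
      exact stepA s (fco (n - q))
    show (let r := s.map (fun z => PySem.Int.mod (z.getD (n - q) 0 - z.getD 0 0) 12)
      let t := fsv r
      let s' := t.map (fun xx => s.getD xx ([] : List Int))
      if s'.length = 1 ∨ q = n then
        let z := s'.getD 0 []
        z.map (fun yy => PySem.Int.mod (yy - z.getD 0 0) 12)
      else pfLoop n fuel (q + 1) s') = _
    simp only [hstep]
    by_cases hqn : q = n
    · subst hqn
      rw [if_pos (Or.inr rfl)]
      simp only [Nat.sub_self]
      rfl
    · have hlt : q < n := lt_of_le_of_ne hq hqn
      have hsub : n - q = (n - (q + 1)) + 1 := by omega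
      have hs2 : sieve (n - q) s = sieve (n - (q + 1)) (filt (n - q) s) := by
        rw [hsub]
        simp only [sieve]
      by_cases hlen : (filt (n - q) s).length = 1
      · rw [if_pos (Or.inl hlen)]
        obtain ⟨c, hc⟩ := List.length_eq_one_iff.mp hlen
        rw [hs2, hc, sieve_singleton]
        rfl
      · rw [if_neg (by push_neg; exact ⟨hlen, hqn⟩)]
        rw [ih (q + 1) (filt (n - q) s) (by omega) (by omega), hs2]

lemma sieve_spec : ∀ (k : Nat) (s : List (List Int)),
    sieve k s = s.filter (fun z => decide (∀ y ∈ s, seg k z ≤ seg k y)) := by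
  intro k
  induction k with
  | zero =>
    intro s
    show filt 0 s = _
    apply List.filter_congr
    intro z hz
    simp only [decide_eq_decide]
    rw [mrel s (fco 0) z hz]
    constructor
    · intro h y hy
      exact (lex_single_le _ _).mpr (h y hy)
    · intro h y hy
      exact (lex_single_le _ _).mp (h y hy)
  | succ k ih =>
    intro s
    show sieve k (filt (k+1) s) = _
    rw [ih]
    unfold filt
    rw [List.filter_filter]
    apply List.filter_congr
    intro z hz
    rw [show ∀ (x y : Bool), (x && y) = decide ((x = true) ∧ (y = true)) by decide]
    simp only [decide_eq_decide, decide_eq_true_eq]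
    constructor
    · rintro ⟨h2, h1⟩ y hy
      have hz1 : ∀ y ∈ s, fco (k+1) z ≤ fco (k+1) y := (mrel s (fco (k+1)) z hz).mp h1
      show fco (k+1) z :: seg k z ≤ fco (k+1) y :: seg k y
      rcases lt_or_eq_of_le (hz1 y hy) with h | h
      · exact (lex_cons_le _ _ _ _).mpr (Or.inl h)
      · refine (lex_cons_le _ _ _ _).mpr (Or.inr ⟨h, ?_⟩)
        refine h2 y (List.mem_filter.mpr ⟨hy, ?_⟩)
        simp only [decide_eq_true_eq]
        rw [← h]
        exact h1
    · intro h
      have hle : ∀ y ∈ s, fco (k+1) z ≤ fco (k+1) y := by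
        intro y hy
        have := (lex_cons_le _ _ _ _).mp (h y hy)
        rcases this with h1 | ⟨h1, _⟩
        · exact le_of_lt h1
        · exact le_of_eq h1
      have h1 : fco (k+1) z = minv (s.map (fco (k+1))) := (mrel s (fco (k+1)) z hz).mpr hle
      refine ⟨?_, h1⟩
      intro y hy
      obtain ⟨hys, hyd⟩ := List.mem_filter.mp hy
      have hyeq : fco (k+1) y = fco (k+1) z := by
        have := of_decide_eq_true hyd
        rw [this, h1]
      have := (lex_cons_le _ _ _ _).mp (h y hys)
      rcases this with h2 | ⟨-, h2⟩
      · omega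
      · exact h2

lemma seg_reverse : ∀ (k : Nat) (z : List Int), k < z.length →
    seg k z = ((tpz z).take (k + 1)).reverse := by
  intro k
  induction k with
  | zero =>
    intro z hz
    cases z with
    | nil => simp at hz
    | cons a t => simp [seg, fco, tpz]
  | succ k ih =>
    intro z hz
    have hk : k < z.length := by omega
    have hlen : k + 1 < (tpz z).length := by simpa [tpz] using hz
    rw [List.take_succ, List.getElem?_eq_getElem hlen]
    show seg (k+1) z = (((tpz z).take (k+1)) ++ [(tpz z)[k+1]]).reverse
    rw [List.reverse_append]
    have hval : (tpz z)[k+1] = fco (k+1) z := by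
      simp only [tpz, List.getElem_map, fco]
      rw [getD_lt' _ _ _ hz]
    rw [hval]
    show fco (k+1) z :: seg k z = [fco (k+1) z] ++ ((tpz z).take (k+1)).reverse
    rw [ih z hk]
    rfl

lemma seg_rev_full (z : List Int) (n : Nat) (hn : z.length = n) (h1 : 0 < n) :
    seg (n - 1) z = (tpz z).reverse := by
  have : n - 1 < z.length := by omega
  rw [seg_reverse _ _ this]
  have hlen : (tpz z).length = n := by simp [tpz, hn]
  have : n - 1 + 1 = n := by omega
  rw [this, ← hlen, List.take_length]

lemma min?_inst {α : Type} (xs : List α) (key : α → List Int) :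
    @PySem.List.min? _ _ List.instLT (fun a b => a.decidableLT b) xs key
      = @PySem.List.min? _ _ List.instLinearOrder.toLT LinearOrder.toDecidableLT xs key := by
  have h : (fun (a b : List Int) => a.decidableLT b)
      = (fun a b => @LinearOrder.toDecidableLT _ List.instLinearOrder a b) := by
    funext a b
    exact Subsingleton.elim _ _
  rw [show (fun (a b : List Int) => a.decidableLT b) = _ from h]

theorem main_core (ps ips : List Int) (n : Nat) (hn : 0 < n)
    (hpslen : ps.length = n) (hipslen : ips.length = n) :
    pfLoop n n 1 ((List.range n).foldl
        (fun acc y => (acc ++ [ps.drop y ++ ps.take y]) ++ [ips.drop y ++ ips.take y]) [])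
      = (@PySem.List.min? _ _ List.instLT (fun a b => a.decidableLT b)
          ([ps, ips].flatMap (fun base => (List.range n).map (fun y =>
            let rot := base.drop y ++ base.take y
            rot.map (fun v => PySem.Int.mod (v - rot.getD 0 0) 12)))) (fun c => c.reverse)).getD [] := by
  set rp : Nat → List Int := fun y => ps.drop y ++ ps.take y with hrp
  set rip : Nat → List Int := fun y => ips.drop y ++ ips.take y with hrip
  set sA := (List.range n).flatMap (fun y => [rp y, rip y]) with hsA
  have hlenA : ∀ z ∈ sA, z.length = n := by
    intro z hz
    rw [hsA] at hz
    obtain ⟨y, hy, hy2⟩ := List.mem_flatMap.mp hz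
    simp only [List.mem_cons, List.not_mem_nil, or_false] at hy2
    have hyn := List.mem_range.mp hy
    rcases hy2 with h | h
    · subst h
      simp only [hrp, List.length_append, List.length_drop, List.length_take, hpslen]
      omega
    · subst h
      simp only [hrip, List.length_append, List.length_drop, List.length_take, hipslen]
      omega
  have hsAne : sA ≠ [] := by
    apply List.ne_nil_of_mem (a := rp 0)
    rw [hsA]
    exact List.mem_flatMap.mpr ⟨0, List.mem_range.mpr hn, by simp⟩
  -- A side
  rw [foldl2app, ← hsA, pfLoop_sieve n n 1 sA hn (by omega)]
  -- B side candidates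
  set cands := [ps, ips].flatMap (fun base => (List.range n).map (fun y =>
      let rot := base.drop y ++ base.take y
      rot.map (fun v => PySem.Int.mod (v - rot.getD 0 0) 12))) with hcands
  rw [min?_inst]
  -- membership correspondence
  have hmemc : ∀ c, c ∈ cands ↔ c ∈ sA.map tpz := by
    intro c
    rw [hcands, hsA]
    simp only [List.flatMap_cons, List.flatMap_nil, List.append_nil, List.mem_append,
      List.mem_map, List.mem_flatMap]
    constructor
    · rintro (⟨y, hy, he⟩ | ⟨y, hy, he⟩)
      · exact ⟨rp y, ⟨y, hy, by simp⟩, by rw [← he]; rfl⟩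
      · exact ⟨rip y, ⟨y, hy, by simp⟩, by rw [← he]; rfl⟩
    · rintro ⟨z, ⟨y, hy, hz⟩, he⟩
      simp only [List.mem_cons, List.not_mem_nil, or_false] at hz
      rcases hz with h | h
      · exact Or.inl ⟨y, hy, by rw [← he, h]; rfl⟩
      · exact Or.inr ⟨y, hy, by rw [← he, h]; rfl⟩
  have hcandsne : cands ≠ [] := by
    apply List.ne_nil_of_mem (a := tpz (rp 0))
    rw [hmemc]
    refine List.mem_map_of_mem ?_
    rw [hsA]
    exact List.mem_flatMap.mpr ⟨0, List.mem_range.mpr hn, by simp⟩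
  -- B's min exists
  obtain ⟨mB, hmB⟩ : ∃ mB,
      @PySem.List.min? _ _ List.instLinearOrder.toLT LinearOrder.toDecidableLT cands
        (fun c => c.reverse) = some mB := by
    cases h : @PySem.List.min? _ _ List.instLinearOrder.toLT LinearOrder.toDecidableLT cands
        (fun c => c.reverse) with
    | none => exact absurd ((@PySem.List.min?_eq_none_iff _ _ List.instLinearOrder.toLT LinearOrder.toDecidableLT _ _).mp h) hcandsne
    | some m => exact ⟨m, rfl⟩
  have hmBmem : mB ∈ cands := @PySem.List.min?_mem _ _ List.instLinearOrder.toLT LinearOrder.toDecidableLT _ _ _ hmB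
  have hmBmin : ∀ c ∈ cands, mB.reverse ≤ c.reverse := PySem.List.min?_isMin hmB
  -- sieve survivors
  rw [sieve_spec]
  set S := sA.filter (fun z => decide (∀ y ∈ sA, seg (n-1) z ≤ seg (n-1) y)) with hS
  have hSne : S ≠ [] := by
    obtain ⟨m1, hm1⟩ : ∃ m1,
        @PySem.List.min? _ _ List.instLinearOrder.toLT LinearOrder.toDecidableLT sA
          (fun z => seg (n-1) z) = some m1 := by
      cases h : @PySem.List.min? _ _ List.instLinearOrder.toLT LinearOrder.toDecidableLT sA
          (fun z => seg (n-1) z) with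
      | none => exact absurd ((@PySem.List.min?_eq_none_iff _ _ List.instLinearOrder.toLT LinearOrder.toDecidableLT _ _).mp h) hsAne
      | some m => exact ⟨m, rfl⟩
    apply List.ne_nil_of_mem (a := m1)
    rw [hS]
    refine List.mem_filter.mpr ⟨@PySem.List.min?_mem _ _ List.instLinearOrder.toLT LinearOrder.toDecidableLT _ _ _ hm1, ?_⟩
    simp only [decide_eq_true_eq]
    exact PySem.List.min?_isMin hm1
  set zA := S.getD 0 ([] : List Int) with hzA
  have hzAS : zA ∈ S := getD_zero_mem _ _ hSne
  have hzAsA : zA ∈ sA := (List.mem_filter.mp hzAS).1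
  have hzAmin : ∀ y ∈ sA, seg (n-1) zA ≤ seg (n-1) y :=
    of_decide_eq_true (List.mem_filter.mp hzAS).2
  have hkey : ∀ z ∈ sA, seg (n-1) z = (tpz z).reverse := fun z hz =>
    seg_rev_full z n (hlenA z hz) hn
  obtain ⟨zB, hzBsA, hzBe⟩ := List.mem_map.mp ((hmemc mB).mp hmBmem)
  have h1 : mB.reverse ≤ (tpz zA).reverse :=
    hmBmin _ ((hmemc (tpz zA)).mpr (List.mem_map_of_mem hzAsA))
  have h2 : (tpz zA).reverse ≤ mB.reverse := by
    rw [← hzBe, ← hkey zA hzAsA, ← hkey zB hzBsA]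
    exact hzAmin zB hzBsA
  have hfin : tpz zA = mB := List.reverse_injective (le_antisymm h2 h1)
  rw [hmB, hfin]
  rfl

theorem main (p : List Int) : primeForm p = primeForm_alt p := by
  by_cases hp : p.length = 0
  · simp [primeForm, primeForm_alt, hp]
  · have hn : 0 < p.length := Nat.pos_of_ne_zero hp
    simp only [primeForm, primeForm_alt]
    rw [if_neg hp, if_neg hp]
    exact main_core (PySem.List.sorted p (fun x => x) false)
      (PySem.List.sorted (p.map (fun x => PySem.Int.mod (12 - x) 12)) (fun x => x) false)
      p.length hn (by rw [PySem.List.length_sorted]) (by rw [PySem.List.length_sorted, List.length_map])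

-- ===== VERDICT (by name: the statement is the Claim_ definition above) =====
theorem primeForm_spec : Claim_equal_primeForm := by
  intro p _
  exact main p
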